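-- pv_equiv track=rewrite | github.com/rickykise/Crawling | crawling_webhard/webhard1_191128/crawling_dev/crawling/portal/naver/naver_news_test.py | checkMaintitle_key
-- ===== SOURCE A (Python) =====
-- def checkMaintitle_key(title_key, newsKey):
--     returnValue = {
--         'm' : None,
--         'r' : None
--     }
--
--     for s in newsKey.keys():
--         if title_key.find(s) != -1 :
--             for m in newsKey[s]:
--                 if title_key.find(m) != -1 :
--                     returnValue['m'] = m
--                     returnValue['r'] = s
--
--
--     return returnValue
-- ===== SOURCE B (Python) =====
-- def checkMaintitle_key(title_key, newsKey):
--     # Reverse early-terminating scan: last matching (key, element) pair is the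
--     # first one found when iterating keys and their lists in reverse order.
--     for s in reversed(list(newsKey.keys())):
--         if title_key.find(s) != -1:
--             for m in reversed(newsKey[s]):
--                 if title_key.find(m) != -1:
--                     return {'m': m, 'r': s}
--     return {'m': None, 'r': None}
-- ===== Notes on version B (the rewrite author's own statement) =====
-- stated objective: faster
-- what changed: B replaces A's forward full scan that keeps overwriting the last match with a reverse early-terminating scan that returns on the first match found when iterating keys and their value lists in reverse order.
import Mathlib
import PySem

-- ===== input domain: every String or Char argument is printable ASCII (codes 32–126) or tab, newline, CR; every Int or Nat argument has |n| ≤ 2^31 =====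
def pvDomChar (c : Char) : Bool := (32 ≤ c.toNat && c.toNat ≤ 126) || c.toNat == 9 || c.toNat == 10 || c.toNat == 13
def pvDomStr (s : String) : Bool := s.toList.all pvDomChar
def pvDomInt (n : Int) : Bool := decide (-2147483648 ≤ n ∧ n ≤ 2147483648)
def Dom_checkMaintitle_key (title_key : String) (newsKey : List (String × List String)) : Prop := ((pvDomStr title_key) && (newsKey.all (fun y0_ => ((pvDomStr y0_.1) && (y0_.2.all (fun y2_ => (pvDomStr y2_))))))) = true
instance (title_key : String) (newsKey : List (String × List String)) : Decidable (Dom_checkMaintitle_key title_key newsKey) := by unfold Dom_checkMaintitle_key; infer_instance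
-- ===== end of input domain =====

-- ===== PORT A =====
-- B replaces A's forward overwrite-last scan with a reverse early-return scan; return values only.
def checkMaintitle_key (title_key : String) (newsKey : List (String × List String)) : List (String × Option String) :=
  let d := PySem.Dict.ofList newsKey
  let st := d.items.foldl
    (fun (rv : Option String × Option String) p =>
      if PySem.Str.find title_key p.1 ≠ -1 then
        p.2.foldl
          (fun (rv : Option String × Option String) m =>
            if PySem.Str.find title_key m ≠ -1 then (some m, some p.1) else rv) rv
      else rv)
    (none, none)
  [("m", st.1), ("r", st.2)]

-- ===== PORT B =====
-- inner reversed loop of Source B: first matching element of the reversed list, early return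
def pvFindRev (title_key : String) : List String → Option String
  | [] => none
  | m :: rest => if PySem.Str.find title_key m ≠ -1 then some m else pvFindRev title_key rest

-- outer reversed loop of Source B over the keys
def pvScanRev (title_key : String) : List (String × List String) → Option (String × String)
  | [] => none
  | (s, ms) :: rest =>
      if PySem.Str.find title_key s ≠ -1 then
        match pvFindRev title_key ms.reverse with
        | some m => some (m, s)
        | none => pvScanRev title_key rest
      else pvScanRev title_key rest

def checkMaintitle_key_alt (title_key : String) (newsKey : List (String × List String)) : List (String × Option String) :=
  match pvScanRev title_key (PySem.Dict.ofList newsKey).items.reverse with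
  | some (m, s) => [("m", some m), ("r", some s)]
  | none => [("m", none), ("r", none)]

-- ===== PRECONDITION & SPEC =====
def Spec_checkMaintitle_key (title_key : String) (newsKey : List (String × List String)) (out : List (String × Option String)) : Prop := out = checkMaintitle_key_alt title_key newsKey
instance (title_key : String) (newsKey : List (String × List String)) (out : List (String × Option String)) : Decidable (Spec_checkMaintitle_key title_key newsKey out) := by unfold Spec_checkMaintitle_key; infer_instance

-- ===== CLAIM (what is proved, stated in full; the proofs are below) =====
def Claim_equal_checkMaintitle_key : Prop := ∀ (title_key : String) (newsKey : List (String × List String)), Dom_checkMaintitle_key title_key newsKey → Spec_checkMaintitle_key title_key newsKey (checkMaintitle_key title_key newsKey)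

-- ===== LEMMAS AND PROOFS =====

theorem pvFindRev_append (t : String) (l1 l2 : List String) :
    pvFindRev t (l1 ++ l2) =
      match pvFindRev t l1 with
      | some m => some m
      | none => pvFindRev t l2 := by
  induction l1 with
  | nil => simp [pvFindRev]
  | cons m rest ih =>
      simp only [List.cons_append, pvFindRev]
      split <;> simp [ih]

theorem pvScanRev_append (t : String) (l1 l2 : List (String × List String)) :
    pvScanRev t (l1 ++ l2) =
      match pvScanRev t l1 with
      | some r => some r
      | none => pvScanRev t l2 := by
  induction l1 with
  | nil => simp [pvScanRev]
  | cons p rest ih =>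
      obtain ⟨s, ms⟩ := p
      simp only [List.cons_append, pvScanRev]
      split
      · cases pvFindRev t ms.reverse <;> simp [ih]
      · simp [ih]

theorem inner_fold_eq (t s : String) (ms : List String) (st : Option String × Option String) :
    ms.foldl (fun (rv : Option String × Option String) m =>
        if PySem.Str.find t m ≠ -1 then (some m, some s) else rv) st
      = match pvFindRev t ms.reverse with
        | some m => (some m, some s)
        | none => st := by
  induction ms generalizing st with
  | nil => simp [pvFindRev]
  | cons m rest ih =>
      simp only [List.foldl_cons, List.reverse_cons, ih, pvFindRev_append]
      cases h : pvFindRev t rest.reverse with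
      | some m' => simp
      | none => simp only [pvFindRev]; split <;> simp

theorem outer_fold_eq (t : String) (l : List (String × List String)) (st : Option String × Option String) :
    l.foldl (fun (rv : Option String × Option String) p =>
        if PySem.Str.find t p.1 ≠ -1 then
          p.2.foldl (fun (rv : Option String × Option String) m =>
              if PySem.Str.find t m ≠ -1 then (some m, some p.1) else rv) rv
        else rv) st
      = match pvScanRev t l.reverse with
        | some (m, s) => (some m, some s)
        | none => st := by
  induction l generalizing st with
  | nil => simp [pvScanRev]
  | cons p rest ih =>
      obtain ⟨s, ms⟩ := p
      simp only [List.foldl_cons, List.reverse_cons, ih, pvScanRev_append]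
      cases h : pvScanRev t rest.reverse with
      | some r => obtain ⟨m', s'⟩ := r; simp
      | none =>
          simp only [pvScanRev, inner_fold_eq]
          split
          · cases pvFindRev t ms.reverse <;> simp
          · simp

-- ===== VERDICT (by name: the statement is the Claim_ definition above) =====
theorem checkMaintitle_key_spec : Claim_equal_checkMaintitle_key := by
  intro t nk _
  unfold Spec_checkMaintitle_key checkMaintitle_key checkMaintitle_key_alt
  simp only [outer_fold_eq]
  cases h : pvScanRev t (PySem.Dict.ofList nk).items.reverse with
  | some r => obtain ⟨m, s⟩ := r; simp
  | none => simp
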